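-- pv_equiv track=rewrite | github.com/chien-wei/LeetCode | 0568_Maximum_Vacation_Days.py | maxVacationDays
-- ===== SOURCE A (Python) =====
-- def maxVacationDays(flights, days):
--
--     def recur(city, week, acc):
--         if week == len(days[0]):
--             return acc
--         mx = 0
--         for j in range(len(flights[city])):
--             if flights[city][j] == 1 or city == j:
--                 mx = max(mx, recur(j, week+1, acc+days[j][week]))
--         return mx
--
--     return recur(0, 0, 0)
-- ===== SOURCE B (Python) =====
-- def maxVacationDays(flights, days):
--     n = len(flights)
--     k = len(days[0])
--     # adjacency: cities reachable from c in one flight (staying put always allowed)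
--     nbrs = [[j for j in range(n) if j == c or flights[c][j] == 1] for c in range(n)]
--     # backward DP: nxt[c] = best vacation days obtainable from city c over the remaining weeks
--     nxt = [0] * n
--     for w in reversed(range(k)):
--         nxt = [max(days[j][w] + nxt[j] for j in nbrs[c]) for c in range(n)]
--     return max(0, nxt[0])
-- ===== Notes on version B (the rewrite author's own statement) =====
-- stated objective: alternative
-- what changed: A explores every K-week travel plan by branching recursion carrying the accumulated days; B instead precomputes per-city adjacency lists and fills a backward dynamic-programming table best[city] week by week, returning max(0, best[0]).
-- outside the precondition, e.g. on maxVacationDays([[]], [[5]]): A returns 0, B returns 5; on maxVacationDays([], [[]]): A returns 0, B raises IndexError; on maxVacationDays([[0, 1]], [[3], [4]]): A returns 4, B returns 3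
import Mathlib
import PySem

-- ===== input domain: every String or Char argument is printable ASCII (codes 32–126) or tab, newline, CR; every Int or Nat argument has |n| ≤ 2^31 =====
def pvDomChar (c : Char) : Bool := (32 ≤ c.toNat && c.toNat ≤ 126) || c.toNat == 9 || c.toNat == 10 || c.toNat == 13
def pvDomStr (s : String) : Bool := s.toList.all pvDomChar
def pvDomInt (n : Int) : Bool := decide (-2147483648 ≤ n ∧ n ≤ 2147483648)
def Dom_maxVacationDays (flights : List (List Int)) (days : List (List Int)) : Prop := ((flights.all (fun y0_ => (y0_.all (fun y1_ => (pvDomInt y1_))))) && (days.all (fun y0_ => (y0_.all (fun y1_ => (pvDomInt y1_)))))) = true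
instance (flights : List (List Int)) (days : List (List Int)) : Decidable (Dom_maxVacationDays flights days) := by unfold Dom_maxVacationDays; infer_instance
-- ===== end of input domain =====

-- B replaces A's branching recursion over whole travel plans by a backward week-by-week
-- dynamic-programming table over cities; equivalence is proved on the problem's shape (Pre_).

-- ===== PORT A =====
-- A's inner `recur`. len(days[0]) is constant, passed as K. The stopping test is written
-- `K ≤ week` (Python: week == len(days[0])): on every state A actually reaches week ≤ K,
-- where the two tests agree; `≤` makes the recursion total. All indices arising are
-- nonnegative and in range under Pre_, so plain `getD` is Python's indexing there.
def recurA (flights days : List (List Int)) (K : Nat) (city week : Nat) (acc : Int) : Int :=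
  if K ≤ week then acc
  else
    (List.range (flights.getD city []).length).foldl
      (fun mx j =>
        if ((flights.getD city []).getD j 0 == 1) || (city == j) then
          max mx (recurA flights days K j (week + 1) (acc + (days.getD j []).getD week 0))
        else mx) 0
termination_by K - week
decreasing_by omega

def maxVacationDays (flights : List (List Int)) (days : List (List Int)) : Int :=
  recurA flights days (days.getD 0 []).length 0 0 0

-- ===== PORT B =====
-- Source B's adjacency precomputation: nbrs[c] = cities reachable from c in one flight
def bNbrs (flights : List (List Int)) (n : Nat) : List (List Nat) :=
  (List.range n).map (fun c =>
    (List.range n).filter (fun j => (j == c) || ((flights.getD c []).getD j 0 == 1)))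

-- Source B's inner comprehension: best over nbrs[c] of this week's days plus next week's entry
def bRow (days : List (List Int)) (w : Nat) (nxt : List Int) (nbrs : List (List Nat))
    (c : Nat) : Int :=
  (PySem.List.max?
    ((nbrs.getD c []).map (fun j => (days.getD j []).getD w 0 + nxt.getD j 0))
    (fun y => y)).getD 0

-- one week of Source B's loop: the new table nxt = [max(...) for c in range(n)]
def bStep (days : List (List Int)) (n w : Nat) (nbrs : List (List Nat))
    (nxt : List Int) : List Int :=
  (List.range n).map (bRow days w nxt nbrs)

-- Source B: for w in reversed(range(k)) — the list [k-1, …, 0]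
def maxVacationDays_alt (flights : List (List Int)) (days : List (List Int)) : Int :=
  let n := flights.length
  let nbrs := bNbrs flights n
  let nxt := ((List.range (days.getD 0 []).length).reverse).foldl
      (fun nxt w => bStep days n w nbrs nxt) (List.replicate n (0 : Int))
  max 0 (nxt.getD 0 0)

-- ===== PRECONDITION & SPEC =====
-- Pre_ restricts to the problem's shape: n ≥ 1 cities whose flight rows cover all n cities
-- (entries beyond them, if any, are not 1, i.e. no edge leads outside the city set) and at
-- least n day rows each covering len(days[0]) weeks. Outside it A's reachability-dependent
-- indexing mostly raises IndexError and, where a branch happens to be skipped, its value is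
-- an accident of the `mx = 0` fallback or of phantom cities beyond row 0's length; B's
-- week/city DP indexes the whole n×K rectangle and raises or returns the rectangle's path
-- maximum there instead.
def Pre_maxVacationDays (flights : List (List Int)) (days : List (List Int)) : Prop :=
  flights ≠ [] ∧
  (∀ r ∈ flights, flights.length ≤ r.length ∧ ∀ v ∈ r.drop flights.length, v ≠ 1) ∧
  flights.length ≤ days.length ∧
  (∀ r ∈ days.take flights.length, (days.getD 0 []).length ≤ r.length)
instance (flights : List (List Int)) (days : List (List Int)) : Decidable (Pre_maxVacationDays flights days) := by unfold Pre_maxVacationDays; infer_instance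

def pvWitness_maxVacationDays : List (List Int) × List (List Int) :=
  ([[0, 1], [1, 0]], [[1, 7], [7, 1]])

def Spec_maxVacationDays (flights : List (List Int)) (days : List (List Int)) (out : Int) : Prop := out = maxVacationDays_alt flights days
instance (flights : List (List Int)) (days : List (List Int)) (out : Int) : Decidable (Spec_maxVacationDays flights days out) := by unfold Spec_maxVacationDays; infer_instance

-- ===== CLAIM (what is proved, stated in full; the proofs are below) =====
def Claim_equal_maxVacationDays : Prop := ∀ (flights : List (List Int)) (days : List (List Int)), Dom_maxVacationDays flights days → Pre_maxVacationDays flights days → Spec_maxVacationDays flights days (maxVacationDays flights days)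

-- ===== LEMMAS AND PROOFS =====

-- B's DP table for week w, built from week K backwards (proof-only helper).
def gTab (flights days : List (List Int)) (n K w : Nat) : List Int :=
  if K ≤ w then List.replicate n 0
  else bStep days n w (bNbrs flights n) (gTab flights days n K (w + 1))
termination_by K - w
decreasing_by omega

-- running max over (acc + z j) starting from (acc + b) pulls acc out
lemma foldl_max_add (z : Nat → Int) (acc : Int) (l : List Nat) :
    ∀ b, l.foldl (fun m j => max m (acc + z j)) (acc + b)
      = acc + l.foldl (fun m j => max m (z j)) b := by
  induction l with
  | nil => intro b; rfl
  | cons h t ih => intro b; simp only [List.foldl_cons, Int.max_add_left, ih]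

-- a max C in the init of a running max floats out
lemma foldl_max_init_max (y : Nat → Int) (C : Int) (l : List Nat) :
    ∀ b, l.foldl (fun m j => max m (y j)) (max C b)
      = max C (l.foldl (fun m j => max m (y j)) b) := by
  induction l with
  | nil => intro b; rfl
  | cons h t ih => intro b; simp only [List.foldl_cons, max_assoc, ih]

-- per-element floors max 0 (…) collapse into one outer floor
lemma foldl_max_floor (y : Nat → Int) (l : List Nat) :
    ∀ b, l.foldl (fun m j => max m (max 0 (y j))) (max 0 b)
      = max 0 (l.foldl (fun m j => max m (y j)) b) := by
  induction l with
  | nil => intro b; rfl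
  | cons h t ih =>
    intro b
    rw [List.foldl_cons, List.foldl_cons, ← sup_sup_distrib_left, ih]

-- A's inner loop over a NONEMPTY filtered candidate list, branch value acc + z j,
-- equals max 0 (acc + Python's max of the mapped list) — the shape of the last week
lemma chain_plain (z : Nat → Int) (acc : Int) (l : List Nat) (hl : l ≠ []) :
    l.foldl (fun m j => max m (acc + z j)) 0
      = max 0 (acc + (PySem.List.max? (l.map z) (fun y => y)).getD 0) := by
  cases l with
  | nil => exact absurd rfl hl
  | cons h t =>
    simp only [List.foldl_cons, List.map_cons, PySem.List.max?_id_cons, Option.getD_some]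
    rw [show (max (0 : Int) (acc + z h)) = max 0 (acc + z h) from rfl,
      foldl_max_init_max, foldl_max_add, List.foldl_map]

-- same, with each branch value floored at 0 (the shape of the earlier weeks)
lemma chain_floor (z : Nat → Int) (acc : Int) (l : List Nat) (hl : l ≠ []) :
    l.foldl (fun m j => max m (max 0 (acc + z j))) 0
      = max 0 (acc + (PySem.List.max? (l.map z) (fun y => y)).getD 0) := by
  cases l with
  | nil => exact absurd rfl hl
  | cons h t =>
    simp only [List.foldl_cons, List.map_cons, PySem.List.max?_id_cons, Option.getD_some]
    rw [show (max (0 : Int) (max 0 (acc + z h))) = max 0 (max 0 (acc + z h)) from rfl,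
      foldl_max_floor, foldl_max_init_max, ← max_assoc, max_self,
      foldl_max_add, List.foldl_map]

-- a loop whose branch condition is everywhere false leaves the accumulator alone
lemma foldl_inert (p : Nat → Bool) (V : Int → Nat → Int) (l : List Nat)
    (h : ∀ j ∈ l, p j = false) :
    ∀ init, l.foldl (fun mx j => if p j then V mx j else mx) init = init := by
  induction l with
  | nil => intro init; rfl
  | cons x t ih =>
    intro init
    rw [List.foldl_cons, if_neg (by simp [h x List.mem_cons_self])]
    exact ih (fun j hj => h j (List.mem_cons_of_mem x hj)) init

-- the candidate list always contains the current city (staying put is allowed)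
lemma filter_candidates_ne_nil (p : Nat → Bool) (n c : Nat) (hc : c < n)
    (hp : p c = true) : (List.range n).filter p ≠ [] := by
  intro h
  have : c ∈ (List.range n).filter p := by
    simp [List.mem_filter, List.mem_range, hc, hp]
  rw [h] at this
  exact absurd this (List.not_mem_nil)

-- MAIN INVARIANT: below week K, A's recursion is acc plus B's table entry, floored at 0
lemma recurA_eq_gTab (flights days : List (List Int))
    (hrow : ∀ r ∈ flights, flights.length ≤ r.length ∧ ∀ v ∈ r.drop flights.length, v ≠ 1) :
    ∀ fuel w c acc, w + fuel = (days.getD 0 []).length → c < flights.length →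
      recurA flights days (days.getD 0 []).length c w acc =
        if (days.getD 0 []).length ≤ w then acc
        else max 0 (acc + (gTab flights days flights.length (days.getD 0 []).length w).getD c 0) := by
  set n := flights.length with hn
  set K := (days.getD 0 []).length with hK
  intro fuel
  induction fuel with
  | zero =>
    intro w c acc hw hc
    rw [recurA, if_pos (by omega), if_pos (by omega)]
  | succ fuel ih =>
    intro w c acc hw hc
    rw [recurA, if_neg (by omega), if_neg (by omega)]
    have hmem : flights.getD c [] ∈ flights := by
      rw [List.getD_eq_getElem flights [] hc]
      exact List.getElem_mem hc
    obtain ⟨hlen, htail⟩ := hrow _ hmem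
    -- A's loop runs over the whole row; the part beyond the n cities is inert
    have hsplit : List.range (flights.getD c []).length
        = List.range n ++ (List.range ((flights.getD c []).length - n)).map (n + ·) := by
      rw [show (flights.getD c []).length = n + ((flights.getD c []).length - n) from by omega,
        List.range_add]
      simp
    rw [hsplit, List.foldl_append,
      foldl_inert _ _ _ (by
        intro j hj
        obtain ⟨i, hi, rfl⟩ := List.mem_map.mp hj
        have hiL : i < (flights.getD c []).length - n := List.mem_range.mp hi
        have h1 : (flights.getD c []).getD (n + i) 0
            = ((flights.getD c []).drop n).getD i 0 := by
          simp [List.getD, List.getElem?_drop]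
        have h2 : (flights.getD c []).getD (n + i) 0 ≠ 1 := by
          rw [h1]
          exact htail _ (by
            rw [List.getD_eq_getElem ((flights.getD c []).drop n) 0 (by simpa using hiL)]
            exact List.getElem_mem _)
        have h3 : c ≠ n + i := by omega
        show ((flights.getD c []).getD (n + i) 0 == 1 || (c == n + i)) = false
        rw [Bool.or_eq_false_iff]
        exact ⟨beq_eq_false_iff_ne.mpr h2, beq_eq_false_iff_ne.mpr h3⟩)]
    -- rewrite every branch of A's loop with the induction hypothesis
    have hfold := List.foldl_ext
      (fun mx j => if ((flights.getD c []).getD j 0 == 1) || (c == j) then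
          max mx (recurA flights days K j (w + 1) (acc + (days.getD j []).getD w 0))
        else mx)
      (fun mx j => if ((flights.getD c []).getD j 0 == 1) || (c == j) then
          max mx (if K ≤ w + 1 then acc + (days.getD j []).getD w 0
            else max 0 (acc + (days.getD j []).getD w 0
              + (gTab flights days n K (w + 1)).getD j 0))
        else mx)
      (0 : Int) (l := List.range n)
      (by
        intro mx j hj
        simp only []
        rw [ih (w + 1) j _ (by omega) (List.mem_range.mp hj)])
    rw [hfold]
    -- candidate predicate; A's and B's versions differ only by Bool.or commutativity
    set pA : Nat → Bool := fun j => ((flights.getD c []).getD j 0 == 1) || (c == j) with hpA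
    have hpBA : ∀ j ∈ List.range n,
        ((j == c) || ((flights.getD c []).getD j 0 == 1)) = pA j := by
      intro j _; rw [hpA]; simp [Bool.or_comm, Bool.beq_comm]
    have hne : (List.range n).filter pA ≠ [] :=
      filter_candidates_ne_nil pA n c hc (by rw [hpA]; simp)
    -- B's table entry at (w, c)
    rw [show gTab flights days n K w
          = bStep days n w (bNbrs flights n) (gTab flights days n K (w + 1)) from by
        rw [gTab, if_neg (by omega)]]
    unfold bStep
    rw [PySem.List.getD_map_range _ _ _ _ hc]
    unfold bRow bNbrs
    rw [PySem.List.getD_map_range _ _ _ _ hc, List.filter_congr hpBA]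
    by_cases hbase : K ≤ w + 1
    · -- last week: the next-week table is all zeros
      simp only [if_pos hbase]
      rw [← List.foldl_filter]
      rw [show gTab flights days n K (w + 1) = List.replicate n 0 from by
        rw [gTab, if_pos hbase]]
      rw [List.map_congr_left (fun j hj => by
        have hjn : j < n := List.mem_range.mp (List.mem_of_mem_filter hj)
        show (days.getD j []).getD w 0 + (List.replicate n (0 : Int)).getD j 0
            = (days.getD j []).getD w 0
        rw [List.getD_replicate 0 hjn, add_zero])]
      exact chain_plain (fun j => (days.getD j []).getD w 0) acc _ hne
    · simp only [if_neg hbase]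
      rw [← List.foldl_filter]
      have hch := chain_floor
        (fun j => (days.getD j []).getD w 0 + (gTab flights days n K (w + 1)).getD j 0)
        acc ((List.range n).filter pA) hne
      simp only [← add_assoc] at hch
      exact hch

-- Source B's week loop, run from week a down to 0 starting at gTab a, lands on gTab 0
lemma foldl_weeks (flights days : List (List Int)) (n K : Nat) :
    ∀ a, a ≤ K →
      ((List.range a).reverse).foldl (fun nxt w => bStep days n w (bNbrs flights n) nxt)
          (gTab flights days n K a)
        = gTab flights days n K 0 := by
  intro a
  induction a with
  | zero => intro _; rfl
  | succ a ih =>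
    intro ha
    have hrev : (List.range (a + 1)).reverse = a :: (List.range a).reverse := by
      rw [List.range_succ, List.reverse_append]; rfl
    rw [hrev, List.foldl_cons]
    rw [show bStep days n a (bNbrs flights n) (gTab flights days n K (a + 1))
          = gTab flights days n K a from by
        rw [show gTab flights days n K a
              = bStep days n a (bNbrs flights n) (gTab flights days n K (a + 1)) from by
            rw [gTab, if_neg (by omega)]]]
    exact ih (by omega)

-- ===== VERDICT (by name: the statement is the Claim_ definition above) =====
theorem maxVacationDays_spec : Claim_equal_maxVacationDays := by
  intro flights days _ hpre
  obtain ⟨hf, hrow, _, _⟩ := hpre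
  unfold Spec_maxVacationDays maxVacationDays maxVacationDays_alt
  set n := flights.length with hn
  set K := (days.getD 0 []).length with hK
  have hc0 : 0 < n := by
    cases flights with
    | nil => exact absurd rfl hf
    | cons h t => simp [hn]
  have hmain := recurA_eq_gTab flights days hrow K 0 0 0 (by omega) hc0
  have hfold := foldl_weeks flights days n K K (le_refl K)
  have hKK : gTab flights days n K K = List.replicate n 0 := by
    rw [gTab, if_pos (le_refl K)]
  rw [hKK] at hfold
  simp only [← hK, ← hn] at hmain ⊢
  rw [hmain, hfold]
  by_cases h0 : K ≤ 0
  · rw [if_pos h0]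
    rw [show gTab flights days n K 0 = List.replicate n 0 from by rw [gTab, if_pos h0]]
    rw [List.getD_replicate 0 hc0]
    simp
  · rw [if_neg h0]
    simp
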